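-- pv_equiv track=rewrite | github.com/eclypse-org/eclypse | tests/fixtures/backends.py | filter_range_step
-- ===== SOURCE A (Python) =====
-- from typing import Any
--
-- def filter_range_step(
--
--     df: list[dict[str, Any]],
--     col: str,
--     start: int,
--     stop: int,
--     step: int,
-- ) -> list[dict[str, Any]]:
--     return [
--         row
--         for row in df
--         if start <= int(row[col]) <= stop
--         and (int(row[col]) - start) % max(step, 1) == 0
--     ]
-- ===== SOURCE B (Python) =====
-- def filter_range_step(df, col, start, stop, step):
--     allowed = set(range(start, stop + 1, max(step, 1)))
--     out = []
--     for row in df: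
--         if int(row[col]) in allowed:
--             out.append(row)
--     return out
-- ===== Notes on version B (the rewrite author's own statement) =====
-- stated objective: alternative
-- what changed: B precomputes the set of admissible column values as set(range(start, stop+1, max(step,1))) once and then scans the rows with an explicit accumulator loop testing set membership, instead of re-evaluating the bounds-and-modulo predicate inside a comprehension per row.
import Mathlib
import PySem

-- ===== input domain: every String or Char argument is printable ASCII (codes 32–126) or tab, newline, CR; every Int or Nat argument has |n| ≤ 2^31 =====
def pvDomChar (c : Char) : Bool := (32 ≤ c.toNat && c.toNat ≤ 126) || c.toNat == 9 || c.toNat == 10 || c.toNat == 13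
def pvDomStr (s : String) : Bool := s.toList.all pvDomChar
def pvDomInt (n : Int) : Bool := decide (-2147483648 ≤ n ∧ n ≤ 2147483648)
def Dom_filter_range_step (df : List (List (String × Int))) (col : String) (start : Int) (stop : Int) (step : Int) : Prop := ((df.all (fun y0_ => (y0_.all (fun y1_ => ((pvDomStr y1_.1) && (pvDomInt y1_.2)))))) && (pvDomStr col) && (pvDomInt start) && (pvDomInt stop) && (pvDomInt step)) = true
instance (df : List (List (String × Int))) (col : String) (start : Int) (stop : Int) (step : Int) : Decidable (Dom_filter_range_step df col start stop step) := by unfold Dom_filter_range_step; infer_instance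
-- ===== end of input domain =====

-- B precomputes the admissible values as set(range(start, stop+1, max(step,1))) and filters rows by membership with an explicit accumulator loop (objective: alternative, same cost).
-- ===== PORT A =====
def filter_range_step (df : List (List (String × Int))) (col : String) (start : Int) (stop : Int) (step : Int) : List (List (String × Int)) :=
  df.filter (fun row =>
    let v : Int := (List.lookup col row).getD 0   -- int(row[col]); Pre_ guarantees the key is present
    decide (start ≤ v) && decide (v ≤ stop) && (PySem.Int.mod (v - start) (max step 1) == 0))

-- ===== PORT B =====
-- explicit accumulator loop: 'out = []; for row in df: if … : out.append(row); return out'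
def pvAltGo (allowed : PySem.Set Int) (col : String) :
    List (List (String × Int)) → List (List (String × Int)) → List (List (String × Int))
  | out, [] => out.reverse
  | out, row :: rest =>
      if PySem.Set.contains allowed ((List.lookup col row).getD 0) then
        pvAltGo allowed col (row :: out) rest
      else
        pvAltGo allowed col out rest

def filter_range_step_alt (df : List (List (String × Int))) (col : String) (start : Int) (stop : Int) (step : Int) : List (List (String × Int)) :=
  let allowed : PySem.Set Int := PySem.Set.ofList (PySem.List.pyRange start (stop + 1) (max step 1))
  pvAltGo allowed col [] df

-- ===== PRECONDITION & SPEC =====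
-- Pre_: every row contains the key col (otherwise Python's row[col] raises KeyError).
def Pre_filter_range_step (df : List (List (String × Int))) (col : String) (start : Int) (stop : Int) (step : Int) : Prop :=
  ∀ row ∈ df, (List.lookup col row).isSome
instance (df : List (List (String × Int))) (col : String) (start : Int) (stop : Int) (step : Int) : Decidable (Pre_filter_range_step df col start stop step) := by unfold Pre_filter_range_step; infer_instance
def pvWitness_filter_range_step : (List (List (String × Int))) × String × Int × Int × Int :=
  ([[("x", 2), ("y", 0)], [("x", 5)]], "x", 0, 10, 2)
def Spec_filter_range_step (df : List (List (String × Int))) (col : String) (start : Int) (stop : Int) (step : Int) (out : List (List (String × Int))) : Prop := out = filter_range_step_alt df col start stop step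
instance (df : List (List (String × Int))) (col : String) (start : Int) (stop : Int) (step : Int) (out : List (List (String × Int))) : Decidable (Spec_filter_range_step df col start stop step out) := by unfold Spec_filter_range_step; infer_instance

-- ===== CLAIM (what is proved, stated in full; the proofs are below) =====
def Claim_equal_filter_range_step : Prop := ∀ (df : List (List (String × Int))) (col : String) (start : Int) (stop : Int) (step : Int), Dom_filter_range_step df col start stop step → Pre_filter_range_step df col start stop step → Spec_filter_range_step df col start stop step (filter_range_step df col start stop step)

-- ===== LEMMAS AND PROOFS =====
-- the accumulator loop is filter
theorem pvAltGo_eq_filter (allowed : PySem.Set Int) (col : String) :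
    ∀ (l out : List (List (String × Int))),
      pvAltGo allowed col out l
        = out.reverse ++ l.filter (fun row => PySem.Set.contains allowed ((List.lookup col row).getD 0)) := by
  intro l
  induction l with
  | nil => intro out; simp [pvAltGo]
  | cons r t ih =>
    intro out
    simp only [pvAltGo]
    by_cases h : PySem.Set.contains allowed ((List.lookup col r).getD 0) = true
    · rw [if_pos h, ih, List.filter_cons_of_pos (p := fun row => PySem.Set.contains allowed ((List.lookup col row).getD 0)) h]
      simp
    · rw [if_neg h, ih,
        List.filter_cons_of_neg (p := fun row => PySem.Set.contains allowed ((List.lookup col row).getD 0)) (by simpa using h)]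

-- the two predicates agree on every value
theorem pvPred_eq (start stop step v : Int) :
    (decide (start ≤ v) && decide (v ≤ stop) && (PySem.Int.mod (v - start) (max step 1) == 0))
      = PySem.Set.contains (PySem.Set.ofList (PySem.List.pyRange start (stop + 1) (max step 1))) v := by
  have hpos : (0 : Int) < max step 1 := by omega
  rw [Bool.eq_iff_iff]
  simp only [Bool.and_eq_true, decide_eq_true_eq, beq_iff_eq, PySem.Set.contains_iff,
    PySem.Set.mem_ofList, PySem.List.mem_pyRange_iff_of_pos hpos, PySem.Int.mod_eq_zero_iff_dvd]
  constructor
  · rintro ⟨⟨h1, h2⟩, h3⟩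
    exact ⟨h1, by omega, h3⟩
  · rintro ⟨h1, h2, h3⟩
    exact ⟨⟨h1, by omega⟩, h3⟩

-- ===== VERDICT (by name: the statement is the Claim_ definition above) =====
theorem filter_range_step_spec : Claim_equal_filter_range_step := by
  intro df col start stop step _ _
  unfold Spec_filter_range_step filter_range_step filter_range_step_alt
  rw [pvAltGo_eq_filter]
  simp only [List.reverse_nil, List.nil_append]
  apply List.filter_congr
  intro row _
  exact pvPred_eq start stop step ((List.lookup col row).getD 0)
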